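-- pv_equiv track=rewrite | github.com/ccdunn/riddler | riddler_20250411.py | rec_build_options
-- ===== SOURCE A (Python) =====
-- def j_of_k_checker(pattern, j_of_ks):
--     pattern_len = len(pattern)
--     for j_of_k in j_of_ks:
--         j, k = j_of_k
--         if pattern_len < k:
--             if j - len(set(pattern)) > k - pattern_len:
--                 return False
--         else:
--             if len(set(pattern[-k:])) < j:
--                 return False
--     return True
--
-- def rec_build_options(previous, l_remaining, n, j_of_ks):
--     valids = []
--     for i in range(n):
--         test_pattern = previous + [i]
--         if j_of_k_checker(test_pattern, j_of_ks):
--             if l_remaining == 1: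
--                 valids.append(test_pattern)
--             else:
--                 test_valid = rec_build_options(test_pattern, l_remaining - 1, n, j_of_ks)
--                 if len(test_valid) > 0:
--                    valids.extend(test_valid)
--     return valids
-- ===== SOURCE B (Python) =====
-- def j_of_k_checker(pattern, j_of_ks):
--     pattern_len = len(pattern)
--     for j_of_k in j_of_ks:
--         j, k = j_of_k
--         if pattern_len < k:
--             if j - len(set(pattern)) > k - pattern_len:
--                 return False
--         else:
--             if len(set(pattern[-k:])) < j:
--                 return False
--     return True
--
-- def rec_build_options(previous, l_remaining, n, j_of_ks):
--     # Iterative breadth-first frontier expansion instead of A's depth-first recursion.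
--     frontier = [previous]
--     for _ in range(l_remaining):
--         if not frontier:
--             break
--         nxt = []
--         for p in frontier:
--             for i in range(n):
--                 cand = p + [i]
--                 if j_of_k_checker(cand, j_of_ks):
--                     nxt.append(cand)
--         frontier = nxt
--     return frontier
-- ===== Notes on version B (the rewrite author's own statement) =====
-- stated objective: alternative
-- what changed: Replaces A's depth-first recursion (with its redundant empty-extend check) by an iterative breadth-first frontier expansion: start from [previous] and l_remaining times extend every valid prefix by every digit, keeping only prefixes the j-of-k checker accepts.
-- outside the precondition, e.g. on rec_build_options([], 0, 0, []): A returns [], B returns [[]]; on rec_build_options([], 0, 2, []): A raises RecursionError, B returns [[]]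
import Mathlib
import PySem

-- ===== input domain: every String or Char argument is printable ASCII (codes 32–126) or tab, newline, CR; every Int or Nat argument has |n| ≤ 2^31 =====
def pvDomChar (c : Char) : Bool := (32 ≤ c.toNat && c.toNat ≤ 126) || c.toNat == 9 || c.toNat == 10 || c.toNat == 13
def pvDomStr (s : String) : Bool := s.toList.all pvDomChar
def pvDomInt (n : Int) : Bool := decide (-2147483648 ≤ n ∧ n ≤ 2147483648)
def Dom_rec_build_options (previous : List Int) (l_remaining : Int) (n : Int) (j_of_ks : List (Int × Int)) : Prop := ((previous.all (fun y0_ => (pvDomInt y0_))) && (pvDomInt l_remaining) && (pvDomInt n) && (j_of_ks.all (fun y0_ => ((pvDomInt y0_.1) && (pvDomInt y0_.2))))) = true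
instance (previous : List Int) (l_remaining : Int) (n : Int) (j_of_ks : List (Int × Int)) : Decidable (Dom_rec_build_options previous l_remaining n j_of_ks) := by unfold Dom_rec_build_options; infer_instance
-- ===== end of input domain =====

-- B replaces A's depth-first recursion by an iterative breadth-first frontier expansion (alternative decomposition, same cost).


-- ===== PORT A =====
-- shared helper (B keeps j_of_k_checker unchanged); loop with early return -> structural recursion
def j_of_k_checker (pattern : List Int) : List (Int × Int) → Bool
  | [] => true
  | (j, k) :: rest =>
    let pattern_len : Int := pattern.length
    if pattern_len < k then
      if j - (PySem.Set.len (PySem.Set.ofList pattern) : Int) > k - pattern_len then false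
      else j_of_k_checker pattern rest
    else
      if (PySem.Set.len (PySem.Set.ofList (PySem.List.slice pattern (some (-k)) none)) : Int) < j then false
      else j_of_k_checker pattern rest

-- A's recursion, with the recursion depth (= l_remaining when l_remaining ≥ 1) as Nat fuel;
-- fuel 0 (Python recurses unboundedly there; excluded by Pre_) returns [].
def recA (n : Int) (j_of_ks : List (Int × Int)) : Nat → List Int → List (List Int)
  | 0, _ => []
  | fuel + 1, previous =>
    (PySem.List.pyRange 0 n 1).foldl (fun valids i =>
      let test_pattern := previous ++ [i]
      if j_of_k_checker test_pattern j_of_ks then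
        if fuel == 0 then valids ++ [test_pattern]
        else
          let test_valid := recA n j_of_ks fuel test_pattern
          if test_valid.length > 0 then valids ++ test_valid else valids
      else valids) []

def rec_build_options (previous : List Int) (l_remaining : Int) (n : Int) (j_of_ks : List (Int × Int)) : List (List Int) :=
  recA n j_of_ks l_remaining.toNat previous

-- ===== PORT B =====
-- one frontier-expansion step: extend every prefix by every i in range(n), keep the valid ones
def stepB (n : Int) (j_of_ks : List (Int × Int)) (frontier : List (List Int)) : List (List Int) :=
  frontier.foldl (fun nxt p =>
    (PySem.List.pyRange 0 n 1).foldl (fun nxt i =>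
      let cand := p ++ [i]
      if j_of_k_checker cand j_of_ks then nxt ++ [cand] else nxt) nxt) []

def iterB (n : Int) (j_of_ks : List (Int × Int)) : Nat → List (List Int) → List (List Int)
  | 0, frontier => frontier
  | fuel + 1, frontier =>
    if frontier.isEmpty then frontier
    else iterB n j_of_ks fuel (stepB n j_of_ks frontier)

def rec_build_options_alt (previous : List Int) (l_remaining : Int) (n : Int) (j_of_ks : List (Int × Int)) : List (List Int) :=
  iterB n j_of_ks l_remaining.toNat [previous]

-- ===== PRECONDITION & SPEC =====
-- Pre_ excludes l_remaining < 1: there Python A either recurses without bound (RecursionError, whenever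
-- n > 0 and some one-step extension passes the checker) or falls out of its degenerate loop with [],
-- an accident of the recursion's base case, while B naturally returns [previous] for "0 levels remaining".
def Pre_rec_build_options (previous : List Int) (l_remaining : Int) (n : Int) (j_of_ks : List (Int × Int)) : Prop :=
  1 ≤ l_remaining
instance (previous : List Int) (l_remaining : Int) (n : Int) (j_of_ks : List (Int × Int)) : Decidable (Pre_rec_build_options previous l_remaining n j_of_ks) := by unfold Pre_rec_build_options; infer_instance
def pvWitness_rec_build_options : List Int × Int × Int × (List (Int × Int)) := ([0], 2, 3, [(2, 3)])

def Spec_rec_build_options (previous : List Int) (l_remaining : Int) (n : Int) (j_of_ks : List (Int × Int)) (out : List (List Int)) : Prop := out = rec_build_options_alt previous l_remaining n j_of_ks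
instance (previous : List Int) (l_remaining : Int) (n : Int) (j_of_ks : List (Int × Int)) (out : List (List Int)) : Decidable (Spec_rec_build_options previous l_remaining n j_of_ks out) := by unfold Spec_rec_build_options; infer_instance

-- ===== CLAIM (what is proved, stated in full; the proofs are below) =====
def Claim_equal_rec_build_options : Prop := ∀ (previous : List Int) (l_remaining : Int) (n : Int) (j_of_ks : List (Int × Int)), Dom_rec_build_options previous l_remaining n j_of_ks → Pre_rec_build_options previous l_remaining n j_of_ks → Spec_rec_build_options previous l_remaining n j_of_ks (rec_build_options previous l_remaining n j_of_ks)

-- ===== LEMMAS AND PROOFS =====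
-- the list of one-step valid extensions of a prefix p
def children (n : Int) (j_of_ks : List (Int × Int)) (p : List Int) : List (List Int) :=
  ((PySem.List.pyRange 0 n 1).filter (fun i => j_of_k_checker (p ++ [i]) j_of_ks)).map (fun i => p ++ [i])

theorem stepB_eq (n : Int) (j_of_ks : List (Int × Int)) (frontier : List (List Int)) :
    stepB n j_of_ks frontier = frontier.flatMap (children n j_of_ks) := by
  unfold stepB children
  rw [show (fun (nxt : List (List Int)) (p : List Int) =>
      (PySem.List.pyRange 0 n 1).foldl (fun nxt i =>
        let cand := p ++ [i]
        if j_of_k_checker cand j_of_ks then nxt ++ [cand] else nxt) nxt)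
    = fun nxt p => nxt ++ ((PySem.List.pyRange 0 n 1).filter (fun i => j_of_k_checker (p ++ [i]) j_of_ks)).map (fun i => p ++ [i]) from by
      funext nxt p
      exact PySem.List.foldl_append_if (fun i => j_of_k_checker (p ++ [i]) j_of_ks) (fun i => p ++ [i]) (PySem.List.pyRange 0 n 1) nxt]
  exact PySem.List.foldl_append_eq_flatMap _ _ _

theorem flatMap_children (n : Int) (j_of_ks : List (Int × Int)) (p : List Int)
    (g : List Int → List (List Int)) :
    (children n j_of_ks p).flatMap g
      = (PySem.List.pyRange 0 n 1).flatMap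
          (fun i => if j_of_k_checker (p ++ [i]) j_of_ks then g (p ++ [i]) else []) := by
  unfold children
  induction PySem.List.pyRange 0 n 1 with
  | nil => rfl
  | cons x xs ih =>
    by_cases h : j_of_k_checker (p ++ [x]) j_of_ks <;>
      simp [h, ih]

theorem recA_one (n : Int) (j_of_ks : List (Int × Int)) (p : List Int) :
    recA n j_of_ks 1 p = children n j_of_ks p := by
  unfold recA children
  exact PySem.List.foldl_append_if (fun i => j_of_k_checker (p ++ [i]) j_of_ks) (fun i => p ++ [i]) (PySem.List.pyRange 0 n 1) []

theorem recA_succ (n : Int) (j_of_ks : List (Int × Int)) (f : Nat) (p : List Int) :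
    recA n j_of_ks (f + 2) p = (children n j_of_ks p).flatMap (recA n j_of_ks (f + 1)) := by
  rw [flatMap_children]
  show (PySem.List.pyRange 0 n 1).foldl _ [] = _
  rw [show (fun (valids : List (List Int)) (i : Int) =>
      let test_pattern := p ++ [i]
      if j_of_k_checker test_pattern j_of_ks then
        if (f + 1 : Nat) == 0 then valids ++ [test_pattern]
        else
          let test_valid := recA n j_of_ks (f + 1) test_pattern
          if test_valid.length > 0 then valids ++ test_valid else valids
      else valids)
    = fun valids i => valids ++ (if j_of_k_checker (p ++ [i]) j_of_ks then recA n j_of_ks (f + 1) (p ++ [i]) else []) from by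
      funext valids i
      by_cases h : j_of_k_checker (p ++ [i]) j_of_ks
      · simp only [h, if_true]
        simp only [Nat.add_one_ne_zero, beq_iff_eq, if_false]
        cases hv : recA n j_of_ks (f + 1) (p ++ [i]) <;> simp
      · simp [h]]
  exact PySem.List.foldl_append_eq_flatMap _ _ _

theorem iterB_eq (n : Int) (j_of_ks : List (Int × Int)) (f : Nat) :
    ∀ frontier : List (List Int),
      iterB n j_of_ks (f + 1) frontier = frontier.flatMap (recA n j_of_ks (f + 1)) := by
  induction f with
  | zero =>
    intro frontier
    rw [iterB]
    cases frontier with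
    | nil => rfl
    | cons q qs =>
      rw [List.isEmpty_cons, if_neg (by simp), iterB, stepB_eq]
      exact List.flatMap_congr (fun p _ => (recA_one n j_of_ks p).symm)
  | succ g ih =>
    intro frontier
    rw [iterB]
    cases frontier with
    | nil => rfl
    | cons q qs =>
      rw [List.isEmpty_cons, if_neg (by simp), ih, stepB_eq, List.flatMap_assoc]
      exact List.flatMap_congr (fun p _ => (recA_succ n j_of_ks g p).symm)

-- ===== VERDICT (by name: the statement is the Claim_ definition above) =====
theorem rec_build_options_spec : Claim_equal_rec_build_options := by
  intro previous l_remaining n j_of_ks _ hpre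
  unfold Pre_rec_build_options at hpre
  unfold Spec_rec_build_options rec_build_options rec_build_options_alt
  obtain ⟨f, hf⟩ : ∃ f : Nat, l_remaining.toNat = f + 1 :=
    ⟨l_remaining.toNat - 1, by omega⟩
  rw [hf, iterB_eq]
  simp
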